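-- pv_equiv track=rewrite | github.com/malhotrariya/Data-Science-Final-Project---Principles-of-Computing | main.py | makeEdgeList
-- ===== SOURCE A (Python) =====
-- def makeEdgeList(labels, biggestDiffs):
--     biggestDiffsAminoList = []
--     for i in biggestDiffs:
--         if i[0] not in biggestDiffsAminoList:
--             biggestDiffsAminoList.append(i[0])
--     commonList = []
--     for i in labels:
--         if i in biggestDiffsAminoList:
--             commonList.append("black")
--         else:
--             commonList.append("white")
--     return commonList
-- ===== SOURCE B (Python) =====
-- def makeEdgeList(labels, biggestDiffs):
--     commonList = ["white"] * len(labels)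
--     index = {}
--     for pos, lab in enumerate(labels):
--         index[lab] = index.get(lab, []) + [pos]
--     for d in biggestDiffs:
--         for pos in index.get(d[0], []):
--             commonList[pos] = "black"
--     return commonList
-- ===== Notes on version B (the rewrite author's own statement) =====
-- stated objective: alternative
-- what changed: B reverses the traversal: instead of deduplicating the diff heads and testing each label for membership, it pre-fills the output with 'white', builds one value-to-positions index over labels, and scatters 'black' into the recorded positions for each diff head.
import Mathlib
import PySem

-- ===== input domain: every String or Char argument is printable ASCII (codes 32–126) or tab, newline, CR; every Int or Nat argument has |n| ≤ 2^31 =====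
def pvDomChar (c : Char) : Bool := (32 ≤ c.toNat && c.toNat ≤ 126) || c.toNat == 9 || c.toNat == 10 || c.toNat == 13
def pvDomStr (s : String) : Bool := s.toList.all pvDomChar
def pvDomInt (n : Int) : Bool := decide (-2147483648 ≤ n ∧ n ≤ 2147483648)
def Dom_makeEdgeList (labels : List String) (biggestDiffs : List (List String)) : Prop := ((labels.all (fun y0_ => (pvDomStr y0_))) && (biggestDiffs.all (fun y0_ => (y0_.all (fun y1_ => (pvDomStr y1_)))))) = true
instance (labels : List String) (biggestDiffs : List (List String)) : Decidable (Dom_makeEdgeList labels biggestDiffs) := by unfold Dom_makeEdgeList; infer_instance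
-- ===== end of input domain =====

-- B replaces A's dedup-then-membership-scan by the reverse traversal: pre-fill 'white',
-- index each label value to its positions in one pass, then scatter 'black' from the diff heads (objective: alternative).

-- ===== PORT A =====
-- i[0] is ported as headD "" — exact on Pre_ (every row of biggestDiffs nonempty).
def makeEdgeList (labels : List String) (biggestDiffs : List (List String)) : List String :=
  let biggestDiffsAminoList :=
    biggestDiffs.foldl (fun acc i =>
      if (i.headD "") ∈ acc then acc else acc ++ [i.headD ""]) []
  labels.foldl (fun acc i =>
    if i ∈ biggestDiffsAminoList then acc ++ ["black"] else acc ++ ["white"]) []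

-- ===== PORT B =====
-- d[0] is ported as headD "" — exact on Pre_; index[lab] = index.get(lab, []) + [pos] is Dict.modify.
def makeEdgeList_alt (labels : List String) (biggestDiffs : List (List String)) : List String :=
  let index : PySem.Dict String (List Int) :=
    (PySem.List.enumerate labels).foldl
      (fun d p => d.modify p.2 [] (fun l => l ++ [p.1])) PySem.Dict.empty
  let commonList := List.replicate labels.length "white"
  biggestDiffs.foldl (fun cl d =>
    (index.getD (d.headD "") []).foldl (fun cl pos => cl.set pos.toNat "black") cl)
    commonList

-- ===== PRECONDITION & SPEC =====
-- Pre_ excludes exactly the inputs where Python A raises IndexError: a row of biggestDiffs that is empty (i[0]).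
def Pre_makeEdgeList (labels : List String) (biggestDiffs : List (List String)) : Prop :=
  ∀ d ∈ biggestDiffs, d ≠ []
instance (labels : List String) (biggestDiffs : List (List String)) : Decidable (Pre_makeEdgeList labels biggestDiffs) := by unfold Pre_makeEdgeList; infer_instance
def pvWitness_makeEdgeList : List String × List (List String) := (["a", "b", "a"], [["a", "x"], ["c"]])

def Spec_makeEdgeList (labels : List String) (biggestDiffs : List (List String)) (out : List String) : Prop := out = makeEdgeList_alt labels biggestDiffs
instance (labels : List String) (biggestDiffs : List (List String)) (out : List String) : Decidable (Spec_makeEdgeList labels biggestDiffs out) := by unfold Spec_makeEdgeList; infer_instance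

-- ===== CLAIM (what is proved, stated in full; the proofs are below) =====
def Claim_equal_makeEdgeList : Prop := ∀ (labels : List String) (biggestDiffs : List (List String)), Dom_makeEdgeList labels biggestDiffs → Pre_makeEdgeList labels biggestDiffs → Spec_makeEdgeList labels biggestDiffs (makeEdgeList labels biggestDiffs)

-- ===== LEMMAS AND PROOFS =====

-- A's dedup accumulator: membership is membership among the heads.
theorem mem_dedup_fold (ds : List (List String)) (acc : List String) (x : String) :
    x ∈ ds.foldl (fun acc i => if (i.headD "") ∈ acc then acc else acc ++ [i.headD ""]) acc ↔
      x ∈ acc ∨ ∃ d ∈ ds, d.headD "" = x := by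
  induction ds generalizing acc with
  | nil => simp
  | cons d ds ih =>
    simp only [List.foldl_cons]
    by_cases h : (d.headD "") ∈ acc
    · rw [if_pos h, ih]
      simp only [List.exists_mem_cons_iff]
      constructor
      · rintro (hx | hx)
        · exact Or.inl hx
        · exact Or.inr (Or.inr hx)
      · rintro (hx | hx | hx)
        · exact Or.inl hx
        · exact Or.inl (hx ▸ h)
        · exact Or.inr hx
    · rw [if_neg h, ih]
      simp only [List.exists_mem_cons_iff, List.mem_append, List.mem_singleton]
      constructor
      · rintro ((hx | hx) | hx)
        · exact Or.inl hx
        · exact Or.inr (Or.inl hx.symm)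
        · exact Or.inr (Or.inr hx)
      · rintro (hx | hx | hx)
        · exact Or.inl (Or.inl hx)
        · exact Or.inl (Or.inr hx.symm)
        · exact Or.inr hx

-- B's index: positions recorded for v are exactly the indices of v in labels.
theorem mem_index_getD (labels : List String) (v : String) (p : Int) :
    p ∈ ((PySem.List.enumerate labels).foldl
        (fun d q => d.modify q.2 [] (fun l => l ++ [q.1])) PySem.Dict.empty).getD v [] ↔
      ∃ k : Nat, (k : Int) = p ∧ labels[k]? = some v := by
  have h1 : (PySem.List.enumerate labels).foldl
        (fun d q => d.modify q.2 [] (fun l => l ++ [q.1])) PySem.Dict.empty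
      = ((PySem.List.enumerate labels).map (fun q => (q.2, q.1))).foldl
        (fun d q => d.modify q.1 [] (fun l => l ++ [q.2])) PySem.Dict.empty := by
    rw [List.foldl_map]
  rw [h1, PySem.Dict.getD_foldl_modify_append]
  simp only [PySem.Dict.getD_empty, List.nil_append, List.filter_map, List.map_map,
    List.mem_map, List.mem_filter, Function.comp]
  constructor
  · rintro ⟨q, ⟨hq, hv⟩, hp⟩
    rcases (PySem.List.mem_enumerate_iff _ _ _).1 hq with ⟨k, hk, rfl⟩
    exact ⟨k, by simpa using hp, by simp [List.getElem?_eq_getElem hk, ← (by simpa using hv : labels[k] = v)]⟩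
  · rintro ⟨k, hp, hv⟩
    have hk : k < labels.length := by
      by_contra h; exact absurd hv (by simp [List.getElem?_eq_none (le_of_not_gt h)])
    refine ⟨((0 : Int) + k, labels[k]), ?_, by simpa using hp⟩
    refine ⟨(PySem.List.mem_enumerate_iff _ _ _).2 ⟨k, hk, rfl⟩, ?_⟩
    have : labels[k] = v := by simpa [List.getElem?_eq_getElem hk] using hv
    simp [this]

-- Painting a list of positions black, pointwise.
theorem getElem?_paint (ps : List Int) (cl : List String) (j : Nat) :
    (ps.foldl (fun c p => c.set p.toNat "black") cl)[j]? =
      if (∃ p ∈ ps, p.toNat = j) ∧ j < cl.length then some "black" else cl[j]? := by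
  induction ps generalizing cl with
  | nil => simp
  | cons p ps ih =>
    simp only [List.foldl_cons]
    rw [ih]
    simp only [List.length_set, List.getElem?_set, List.mem_cons]
    by_cases hj : j < cl.length
    · by_cases hps : ∃ q ∈ ps, q.toNat = j
      · simp [hps, hj]
      · by_cases hp : p.toNat = j
        · simp [hps, hj, hp]
        · have : ¬ ((∃ q, (q = p ∨ q ∈ ps) ∧ q.toNat = j)) := by
            rintro ⟨q, hq | hq, h2⟩
            · exact hp (hq ▸ h2)
            · exact hps ⟨q, hq, h2⟩
          simp [hps, hj, hp, this]
    · simp [hj]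
      intro _
      omega

theorem length_paint (ps : List Int) (cl : List String) :
    (ps.foldl (fun c p => c.set p.toNat "black") cl).length = cl.length := by
  induction ps generalizing cl with
  | nil => rfl
  | cons p ps ih => simp [List.foldl_cons, ih]

-- The outer scatter loop of B, pointwise.
theorem getElem?_scatter (labels : List String) (ds : List (List String))
    (cl : List String) (hlen : cl.length = labels.length) (j : Nat) :
    (ds.foldl (fun cl d =>
        (((PySem.List.enumerate labels).foldl
            (fun d q => d.modify q.2 [] (fun l => l ++ [q.1])) PySem.Dict.empty).getD (d.headD "") []).foldl
          (fun cl pos => cl.set pos.toNat "black") cl) cl)[j]? =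
      if ∃ d ∈ ds, labels[j]? = some (d.headD "") then some "black" else cl[j]? := by
  induction ds generalizing cl with
  | nil => simp
  | cons d ds ih =>
    simp only [List.foldl_cons]
    rw [ih _ (by rw [length_paint, hlen])]
    rw [getElem?_paint]
    have hmem : (∃ p ∈ ((PySem.List.enumerate labels).foldl
          (fun d q => d.modify q.2 [] (fun l => l ++ [q.1])) PySem.Dict.empty).getD (d.headD "") [],
          p.toNat = j) ∧ j < cl.length ↔ labels[j]? = some (d.headD "") := by
      constructor
      · rintro ⟨⟨p, hp, hpj⟩, _⟩
        rcases (mem_index_getD labels _ p).1 hp with ⟨k, hk, hv⟩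
        have : k = j := by omega
        subst this; exact hv
      · intro hv
        have hj : j < labels.length := by
          by_contra h; exact absurd hv (by simp [List.getElem?_eq_none (le_of_not_gt h)])
        exact ⟨⟨(j : Int), (mem_index_getD labels _ _).2 ⟨j, rfl, hv⟩, by simp⟩, by omega⟩
    by_cases h1 : ∃ e ∈ ds, labels[j]? = some (e.headD "")
    · have h3 : ∃ e ∈ d :: ds, labels[j]? = some (e.headD "") := by
        rcases h1 with ⟨e, he, hv⟩; exact ⟨e, List.mem_cons_of_mem _ he, hv⟩
      rw [if_pos h1, if_pos h3]
    · by_cases h2 : labels[j]? = some (d.headD "")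
      · have h3 : ∃ e ∈ d :: ds, labels[j]? = some (e.headD "") := ⟨d, List.mem_cons_self, h2⟩
        rw [if_pos h3, if_neg h1, if_pos (hmem.2 h2)]
      · have h3 : ¬ ∃ e ∈ d :: ds, labels[j]? = some (e.headD "") := by
          rintro ⟨e, he, hv⟩
          rcases List.mem_cons.1 he with rfl | he'
          · exact h2 hv
          · exact h1 ⟨e, he', hv⟩
        rw [if_neg h1, if_neg h3, if_neg (fun hc => h2 (hmem.1 hc))]

-- ===== VERDICT (by name: the statement is the Claim_ definition above) =====
theorem makeEdgeList_spec : Claim_equal_makeEdgeList := by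
  intro labels biggestDiffs _ _
  unfold Spec_makeEdgeList makeEdgeList makeEdgeList_alt
  have hA : (labels.foldl (fun acc i =>
      if i ∈ biggestDiffs.foldl (fun acc i => if (i.headD "") ∈ acc then acc else acc ++ [i.headD ""]) []
      then acc ++ ["black"] else acc ++ ["white"]) [])
      = labels.map (fun i =>
        if i ∈ biggestDiffs.foldl (fun acc i => if (i.headD "") ∈ acc then acc else acc ++ [i.headD ""]) []
        then "black" else "white") := by
    have : (fun (acc : List String) (i : String) =>
        if i ∈ biggestDiffs.foldl (fun acc i => if (i.headD "") ∈ acc then acc else acc ++ [i.headD ""]) []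
        then acc ++ ["black"] else acc ++ ["white"])
        = (fun acc i => acc ++ [if i ∈ biggestDiffs.foldl (fun acc i => if (i.headD "") ∈ acc then acc else acc ++ [i.headD ""]) []
          then "black" else "white"]) := by
      funext acc i; split <;> rfl
    rw [this, PySem.List.foldl_append_singleton_eq_map, List.nil_append]
  rw [hA]
  apply List.ext_getElem?
  intro j
  rw [getElem?_scatter labels biggestDiffs _ (by simp) j]
  by_cases hj : j < labels.length
  · have hget : labels[j]? = some labels[j] := List.getElem?_eq_getElem hj
    rw [List.getElem?_map, hget, Option.map_some]
    by_cases hb : ∃ d ∈ biggestDiffs, (some labels[j] : Option String) = some (d.headD "")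
    · have hmem : labels[j] ∈ biggestDiffs.foldl (fun acc i => if (i.headD "") ∈ acc then acc else acc ++ [i.headD ""]) [] := by
        rcases hb with ⟨d, hd, hv⟩
        exact (mem_dedup_fold biggestDiffs [] _).2 (Or.inr ⟨d, hd, (Option.some.inj hv).symm⟩)
      rw [if_pos hb, if_pos hmem]
    · have hmem : labels[j] ∉ biggestDiffs.foldl (fun acc i => if (i.headD "") ∈ acc then acc else acc ++ [i.headD ""]) [] := by
        intro hc
        rcases (mem_dedup_fold biggestDiffs [] _).1 hc with h | ⟨d, hd, hv⟩
        · simp at h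
        · exact hb ⟨d, hd, by rw [hv]⟩
      rw [if_neg hb, if_neg hmem, List.getElem?_replicate, if_pos hj]
  · have h0 : labels[j]? = none := List.getElem?_eq_none (le_of_not_gt hj)
    have hb : ¬ ∃ d ∈ biggestDiffs, labels[j]? = some (d.headD "") := by
      rintro ⟨d, _, hv⟩; rw [h0] at hv; simp at hv
    rw [if_neg hb, List.getElem?_map, h0, List.getElem?_replicate,
      if_neg (by simpa using hj)]
    rfl
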